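-- pv_equiv track=rewrite | github.com/viktor-nikolaus/advent-of-code | 2024/day_22.py | generate_secret_number
-- ===== SOURCE A (Python) =====
-- def mix_and_prune(number, other):
--     return (int(number) ^ int(other)) & 0xFFFFFF
--
-- def generate_secret_number(number, iterations):
--     secret_number = number
--     for _ in range(iterations):
--         new_secret_number = secret_number
--         new_secret_number = mix_and_prune(new_secret_number, new_secret_number << 6)
--         new_secret_number = mix_and_prune(new_secret_number, new_secret_number >> 5)
--         new_secret_number = mix_and_prune(new_secret_number, new_secret_number << 11)
--         secret_number = new_secret_number
--     return secret_number
-- ===== SOURCE B (Python) =====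
-- _MASK = 0xFFFFFF
--
--
-- def _step(x):
--     x = (x ^ (x << 6)) & _MASK
--     x = (x ^ (x >> 5)) & _MASK
--     x = (x ^ (x << 11)) & _MASK
--     return x
--
--
-- def _step_matrix():
--     # column j = image of the basis vector 2**j under one PRNG step (GF(2)-linear)
--     return [_step(1 << j) for j in range(24)]
--
--
-- def _apply(cols, v):
--     # matrix * vector over GF(2): xor the columns at the set bits of v
--     r = 0
--     for c in cols:
--         if v & 1:
--             r ^= c
--         v >>= 1
--     return r
--
--
-- def _matmul(a, b):
--     return [_apply(a, c) for c in b]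
--
--
-- def _matpow(m, e):
--     # binary exponentiation of the 24x24 GF(2) matrix
--     acc = [1 << j for j in range(24)]
--     while e > 0:
--         if e & 1:
--             acc = _matmul(m, acc)
--         m = _matmul(m, m)
--         e >>= 1
--     return acc
--
--
-- def generate_secret_number(number, iterations):
--     if iterations <= 0:
--         return number
--     v = _step(number)
--     return _apply(_matpow(_step_matrix(), iterations - 1), v)
-- ===== Notes on version B (the rewrite author's own statement) =====
-- stated objective: faster
-- what changed: Replaced the per-iteration xorshift loop by raising the 24x24 GF(2) transition matrix of the (linear) PRNG step to the power iterations-1 via binary exponentiation, applied to the state after one explicit step.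
import Mathlib
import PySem

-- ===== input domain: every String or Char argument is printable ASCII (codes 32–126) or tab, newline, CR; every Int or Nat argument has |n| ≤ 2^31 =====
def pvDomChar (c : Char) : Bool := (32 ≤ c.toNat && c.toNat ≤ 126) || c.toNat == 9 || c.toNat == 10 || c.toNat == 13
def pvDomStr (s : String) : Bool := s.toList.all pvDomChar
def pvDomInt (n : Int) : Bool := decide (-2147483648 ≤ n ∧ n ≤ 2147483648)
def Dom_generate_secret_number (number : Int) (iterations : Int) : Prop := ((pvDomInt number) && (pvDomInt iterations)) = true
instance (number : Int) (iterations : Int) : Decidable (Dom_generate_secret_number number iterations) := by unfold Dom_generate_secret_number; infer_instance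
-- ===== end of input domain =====

-- B replaces A's per-iteration loop by raising the 24x24 GF(2) transition matrix of the
-- (linear) xorshift step to the power `iterations` with binary exponentiation.

-- ===== PORT A =====
def mix_and_prune (number : Int) (other : Int) : Int :=
  -- int() on an int is the identity; & 0xFFFFFF = PySem.Int.band _ 16777215
  PySem.Int.band (PySem.Int.bxor number other) 16777215

def generate_secret_number (number : Int) (iterations : Int) : Int :=
  -- for _ in range(iterations): the loop variable is unused
  (PySem.List.pyRange 0 iterations 1).foldl
    (fun secret_number _ =>
      let n1 := mix_and_prune secret_number (secret_number <<< (6 : Nat))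
      let n2 := mix_and_prune n1 (n1 >>> (5 : Nat))
      mix_and_prune n2 (n2 <<< (11 : Nat)))
    number

-- ===== PORT B =====
-- _step of Source B
def pvStep (x : Int) : Int :=
  let x1 := PySem.Int.band (PySem.Int.bxor x (x <<< (6 : Nat))) 16777215
  let x2 := PySem.Int.band (PySem.Int.bxor x1 (x1 >>> (5 : Nat))) 16777215
  PySem.Int.band (PySem.Int.bxor x2 (x2 <<< (11 : Nat))) 16777215

-- _step_matrix of Source B (range(24) yields the nonnegative indices 0..23, shift amounts are Nat)
def pvStepMatrix : List Int :=
  (List.range 24).map (fun j : Nat => pvStep ((1 : Int) <<< j))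

-- _apply of Source B: fold over the columns with state (r, v); `if v & 1:` is truthiness, i.e. ≠ 0
def pvApply (cols : List Int) (v : Int) : Int :=
  (cols.foldl
    (fun (s : Int × Int) c =>
      (if PySem.Int.band s.2 1 ≠ 0 then PySem.Int.bxor s.1 c else s.1, s.2 >>> (1 : Nat)))
    ((0 : Int), v)).1

-- _matmul of Source B
def pvMatmul (a : List Int) (b : List Int) : List Int := b.map (fun c => pvApply a c)

-- the while-loop of _matpow (e > 0 test, e & 1 test, e >>= 1); e is nonnegative so it is a Nat
def pvMatpowLoop (m : List Int) (acc : List Int) (e : Nat) : List Int :=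
  if h : e = 0 then acc
  else pvMatpowLoop (pvMatmul m m) (if e % 2 = 1 then pvMatmul m acc else acc) (e / 2)
  termination_by e
  decreasing_by exact Nat.div_lt_self (Nat.pos_of_ne_zero h) (by omega)

-- _matpow of Source B: acc starts as the identity matrix [1 << j for j in range(24)]
def pvMatpow (m : List Int) (e : Nat) : List Int :=
  pvMatpowLoop m ((List.range 24).map (fun j : Nat => (1 : Int) <<< j)) e

def generate_secret_number_alt (number : Int) (iterations : Int) : Int :=
  if iterations ≤ 0 then number
  else pvApply (pvMatpow pvStepMatrix (iterations - 1).toNat) (pvStep number)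

-- ===== PRECONDITION & SPEC =====
def Spec_generate_secret_number (number : Int) (iterations : Int) (out : Int) : Prop := out = generate_secret_number_alt number iterations
instance (number : Int) (iterations : Int) (out : Int) : Decidable (Spec_generate_secret_number number iterations out) := by unfold Spec_generate_secret_number; infer_instance

-- ===== CLAIM (what is proved, stated in full; the proofs are below) =====
def Claim_equal_generate_secret_number : Prop := ∀ (number : Int) (iterations : Int), Dom_generate_secret_number number iterations → Spec_generate_secret_number number iterations (generate_secret_number number iterations)

-- ===== LEMMAS AND PROOFS =====

-- Nat-level mirror of the PRNG step and of _apply (the reasoning happens on Nat, where the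
-- bitwise xor/and/shift distributivity lemmas live)
def stg1 (m : Nat) : Nat := (m ^^^ m <<< 6) &&& 16777215
def stg2 (m : Nat) : Nat := (m ^^^ m >>> 5) &&& 16777215
def stg3 (m : Nat) : Nat := (m ^^^ m <<< 11) &&& 16777215
def stepN (m : Nat) : Nat := stg3 (stg2 (stg1 m))

def fN : Nat × Nat → Nat → Nat × Nat :=
  fun s c => (if s.2 % 2 = 1 then s.1 ^^^ c else s.1, s.2 >>> 1)

def applyN (cols : List Nat) (m : Nat) : Nat :=
  (cols.foldl fN ((0 : Nat), m)).1

-- accumulator shape of applyN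
lemma applyN_foldl (cols : List Nat) : ∀ (r m : Nat),
    (cols.foldl fN ((r : Nat), m)).1 = r ^^^ applyN cols m := by
  induction cols with
  | nil => intro r m; simp [applyN]
  | cons c cs ih =>
      intro r m
      rw [show applyN (c :: cs) m = (cs.foldl fN (fN (0, m) c)).1 from rfl,
        List.foldl_cons,
        show fN (r, m) c = (if m % 2 = 1 then r ^^^ c else r, m >>> 1) from rfl,
        show fN (0, m) c = (if m % 2 = 1 then 0 ^^^ c else 0, m >>> 1) from rfl]
      by_cases h : m % 2 = 1
      · rw [if_pos h, if_pos h, ih, ih]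
        simp [Nat.xor_assoc]
      · rw [if_neg h, if_neg h, ih, ih]
        simp

lemma applyN_cons (c : Nat) (cs : List Nat) (m : Nat) :
    applyN (c :: cs) m = (if m % 2 = 1 then c else 0) ^^^ applyN cs (m >>> 1) := by
  rw [show applyN (c :: cs) m = (cs.foldl fN (fN (0, m) c)).1 from rfl,
    show fN (0, m) c = (if m % 2 = 1 then 0 ^^^ c else 0, m >>> 1) from rfl]
  by_cases h : m % 2 = 1
  · rw [if_pos h, if_pos h, applyN_foldl]
    simp
  · rw [if_neg h, if_neg h, applyN_foldl]

lemma applyN_zero (cols : List Nat) : applyN cols 0 = 0 := by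
  induction cols with
  | nil => rfl
  | cons c cs ih => simp [applyN_cons, ih]

lemma applyN_linear (cols : List Nat) : ∀ (x y : Nat),
    applyN cols (x ^^^ y) = applyN cols x ^^^ applyN cols y := by
  induction cols with
  | nil => intro x y; simp [applyN]
  | cons c cs ih =>
      intro x y
      rw [applyN_cons, applyN_cons, applyN_cons, Nat.shiftRight_xor_distrib, ih]
      have hx2 : (x ^^^ y) % 2 = (x % 2) ^^^ (y % 2) := by
        rw [← Nat.and_one_is_mod, ← Nat.and_one_is_mod, ← Nat.and_one_is_mod,
          Nat.and_xor_distrib_right]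
      rcases Nat.mod_two_eq_zero_or_one x with hx | hx <;>
        rcases Nat.mod_two_eq_zero_or_one y with hy | hy <;>
          simp [hx2, hx, hy, Nat.xor_assoc, Nat.xor_comm, Nat.xor_left_comm]

-- splitting off the low bit
lemma lowbit_split (m : Nat) : (m &&& 1) ^^^ (m >>> 1) <<< 1 = m := by
  apply Nat.eq_of_testBit_eq
  intro i
  simp only [Nat.testBit_xor, Nat.testBit_and, Nat.testBit_shiftLeft, Nat.testBit_shiftRight]
  cases i with
  | zero => simp
  | succ i =>
      have h1 : Nat.testBit 1 (i + 1) = false := by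
        simp [Nat.testBit_succ]
      simp [h1, Nat.add_comm]

-- the basis lemma: applying the matrix whose columns are f(2^j) IS applying f, for linear f
lemma applyN_of_linear : ∀ (k : Nat) (f : Nat → Nat),
    (∀ x y, f (x ^^^ y) = f x ^^^ f y) → f 0 = 0 → ∀ m, m < 2 ^ k →
    applyN ((List.range k).map (fun j => f (1 <<< j))) m = f m := by
  intro k
  induction k with
  | zero =>
      intro f _ hf0 m hm
      interval_cases m
      simpa [applyN] using hf0.symm
  | succ k ih =>
      intro f hf hf0 m hm
      rw [List.range_succ_eq_map, List.map_cons, List.map_map, applyN_cons]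
      have hcomp : ((fun j => f (1 <<< j)) ∘ Nat.succ)
          = (fun j => (fun x => f (x <<< 1)) (1 <<< j)) := by
        funext j
        simp [Function.comp, Nat.succ_eq_add_one, Nat.shiftLeft_add]
      have hg : ∀ x y, f ((x ^^^ y) <<< 1) = f (x <<< 1) ^^^ f (y <<< 1) := by
        intro x y; rw [Nat.shiftLeft_xor_distrib, hf]
      have hm2 : m >>> 1 < 2 ^ k := by
        rw [Nat.shiftRight_one]
        have := Nat.pow_succ 2 k
        omega
      rw [hcomp, ih (fun x => f (x <<< 1)) hg (by simpa using hf0) (m >>> 1) hm2]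
      have hbit : (if m % 2 = 1 then f 1 else 0) = f (m &&& 1) := by
        rcases Nat.mod_two_eq_zero_or_one m with h | h <;>
          simp [Nat.and_one_is_mod, h, hf0]
      rw [show (1 : Nat) <<< 0 = 1 from rfl, hbit, ← hf, lowbit_split]

-- matrix multiplication composes applications (no side conditions needed over Nat)
lemma applyN_matmul (a : List Nat) (b : List Nat) : ∀ (m : Nat),
    applyN (b.map (applyN a)) m = applyN a (applyN b m) := by
  induction b with
  | nil => intro m; exact (applyN_zero a).symm
  | cons c cs ih =>
      intro m
      rw [List.map_cons, applyN_cons, applyN_cons, ih, applyN_linear]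
      congr 1
      by_cases h : m % 2 = 1 <;> simp [h, applyN_zero]

-- ---- transport between the Int ports and the Nat mirror ----

lemma pvApply_natCast (cols : List Int) (h : ∀ c ∈ cols, 0 ≤ c) (m : Nat) :
    pvApply cols (m : Int) = ((applyN (cols.map Int.toNat) m : Nat) : Int) := by
  suffices H : ∀ (cols : List Int), (∀ c ∈ cols, 0 ≤ c) → ∀ (r m : Nat),
      (cols.foldl
        (fun (s : Int × Int) c =>
          (if PySem.Int.band s.2 1 ≠ 0 then PySem.Int.bxor s.1 c else s.1, s.2 >>> (1 : Nat)))
        (((r : Nat) : Int), ((m : Nat) : Int))).1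
      = (((cols.map Int.toNat).foldl fN ((r : Nat), m)).1 : Int) by
    simpa [pvApply, applyN] using H cols h 0 m
  clear h m cols
  intro cols
  induction cols with
  | nil => intro _ r m; simp
  | cons c cs ih =>
      intro h r m
      have hc : 0 ≤ c := h c (by simp)
      have hcs : ∀ x ∈ cs, 0 ≤ x := fun x hx => h x (by simp [hx])
      obtain ⟨cn, rfl⟩ := Int.eq_ofNat_of_zero_le hc
      simp only [List.foldl_cons, List.map_cons]
      have hb1 : PySem.Int.band (m : Int) 1 = ((m &&& 1 : Nat) : Int) := by
        exact_mod_cast PySem.Int.band_natCast m 1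
      rw [hb1, ← Int.natCast_shiftRight m 1, PySem.Int.bxor_natCast r cn]
      simp only [fN, Int.toNat_natCast]
      have hb : ((m &&& 1 : Nat) : Int) ≠ 0 ↔ m % 2 = 1 := by
        rw [Nat.and_one_is_mod]
        omega
      by_cases hp : m % 2 = 1
      · rw [if_pos (hb.mpr hp), if_pos hp]
        exact ih hcs (r ^^^ cn) (m >>> 1)
      · rw [if_neg (fun hx => hp (hb.mp hx)), if_neg hp]
        exact ih hcs r (m >>> 1)

lemma pvApply_nonneg (cols : List Int) (h : ∀ c ∈ cols, 0 ≤ c) (m : Nat) :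
    0 ≤ pvApply cols (m : Int) := by
  rw [pvApply_natCast cols h m]; exact Int.natCast_nonneg _

lemma pvMatmul_natCast (a b : List Int) (ha : ∀ c ∈ a, 0 ≤ c) (hb : ∀ c ∈ b, 0 ≤ c) :
    (pvMatmul a b).map Int.toNat = (b.map Int.toNat).map (applyN (a.map Int.toNat)) := by
  unfold pvMatmul
  rw [List.map_map, List.map_map]
  apply List.map_congr_left
  intro c hc
  have h0 : 0 ≤ c := hb c hc
  obtain ⟨cn, rfl⟩ := Int.eq_ofNat_of_zero_le h0
  simp [Function.comp, pvApply_natCast a ha cn]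

lemma pvMatmul_nonneg (a b : List Int) (ha : ∀ c ∈ a, 0 ≤ c) (hb : ∀ c ∈ b, 0 ≤ c) :
    ∀ c ∈ pvMatmul a b, 0 ≤ c := by
  intro c hc
  unfold pvMatmul at hc
  obtain ⟨x, hx, rfl⟩ := List.mem_map.mp hc
  have h0 : 0 ≤ x := hb x hx
  obtain ⟨xn, rfl⟩ := Int.eq_ofNat_of_zero_le h0
  exact pvApply_nonneg a ha xn

-- the binary-exponentiation loop computes the e-fold iterate
lemma pvMatpowLoop_apply : ∀ (e : Nat) (m acc : List Int),
    (∀ c ∈ m, 0 ≤ c) → (∀ c ∈ acc, 0 ≤ c) → ∀ (v : Nat),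
    pvApply (pvMatpowLoop m acc e) (v : Int)
      = (((applyN (m.map Int.toNat))^[e] (applyN (acc.map Int.toNat) v) : Nat) : Int) := by
  intro e
  induction e using Nat.strong_induction_on with
  | _ e ih =>
      intro m acc hm hacc v
      by_cases he : e = 0
      · subst he
        rw [pvMatpowLoop]
        simp [pvApply_natCast acc hacc v]
      · rw [pvMatpowLoop]
        simp only [he, dite_false]
        have hmm : ∀ c ∈ pvMatmul m m, 0 ≤ c := pvMatmul_nonneg m m hm hm
        have hacc' : ∀ c ∈ (if e % 2 = 1 then pvMatmul m acc else acc), 0 ≤ c := by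
          split
          · exact pvMatmul_nonneg m acc hm hacc
          · exact hacc
        rw [ih (e / 2) (Nat.div_lt_self (Nat.pos_of_ne_zero he) (by omega)) _ _ hmm hacc' v]
        congr 1
        -- pure Nat reasoning from here on
        have hsq : applyN ((pvMatmul m m).map Int.toNat)
            = (applyN (m.map Int.toNat)) ∘ (applyN (m.map Int.toNat)) := by
          funext w
          rw [pvMatmul_natCast m m hm hm, applyN_matmul]
          rfl
        have hsq_it : (applyN ((pvMatmul m m).map Int.toNat))^[e / 2]
            = (applyN (m.map Int.toNat))^[2 * (e / 2)] := by
          rw [hsq, Function.iterate_mul (applyN (m.map Int.toNat)) 2 (e / 2)]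
          rfl
        rw [hsq_it]
        rcases Nat.mod_two_eq_zero_or_one e with hp | hp
        · have h2 : 2 * (e / 2) = e := by omega
          rw [if_neg (by omega), h2]
        · rw [if_pos hp, pvMatmul_natCast m acc hm hacc, applyN_matmul,
            ← Function.iterate_succ_apply]
          congr 1
          omega

-- step transported to Nat
lemma pvStep_natCast (m : Nat) : pvStep (m : Int) = ((stepN m : Nat) : Int) := by
  have hmask : (16777215 : Int) = ((16777215 : Nat) : Int) := by norm_num
  simp only [pvStep, stepN, stg1, stg2, stg3, hmask, ← Int.natCast_shiftLeft,
    ← Int.natCast_shiftRight, PySem.Int.bxor_natCast, PySem.Int.band_natCast]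

lemma mask_shl_linear (k : Nat) (x y : Nat) :
    ((x ^^^ y) ^^^ (x ^^^ y) <<< k) &&& 16777215
      = ((x ^^^ x <<< k) &&& 16777215) ^^^ ((y ^^^ y <<< k) &&& 16777215) := by
  rw [Nat.shiftLeft_xor_distrib, ← Nat.and_xor_distrib_right]
  congr 1
  simp [Nat.xor_assoc, Nat.xor_comm, Nat.xor_left_comm]

lemma mask_shr_linear (k : Nat) (x y : Nat) :
    ((x ^^^ y) ^^^ (x ^^^ y) >>> k) &&& 16777215
      = ((x ^^^ x >>> k) &&& 16777215) ^^^ ((y ^^^ y >>> k) &&& 16777215) := by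
  rw [Nat.shiftRight_xor_distrib, ← Nat.and_xor_distrib_right]
  congr 1
  simp [Nat.xor_assoc, Nat.xor_comm, Nat.xor_left_comm]

lemma stg1_linear (x y : Nat) : stg1 (x ^^^ y) = stg1 x ^^^ stg1 y :=
  mask_shl_linear 6 x y
lemma stg2_linear (x y : Nat) : stg2 (x ^^^ y) = stg2 x ^^^ stg2 y :=
  mask_shr_linear 5 x y
lemma stg3_linear (x y : Nat) : stg3 (x ^^^ y) = stg3 x ^^^ stg3 y :=
  mask_shl_linear 11 x y

lemma stepN_linear (x y : Nat) : stepN (x ^^^ y) = stepN x ^^^ stepN y := by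
  unfold stepN
  rw [stg1_linear, stg2_linear, stg3_linear]

lemma stepN_lt (m : Nat) : stepN m < 16777216 := by
  have h := Nat.and_le_right (n := stg2 (stg1 m) ^^^ (stg2 (stg1 m)) <<< 11) (m := 16777215)
  simp only [stepN, stg3]
  omega

-- bounds of the masking & 0xFFFFFF on an arbitrary Int
lemma band_mask_bounds (a : Int) :
    0 ≤ PySem.Int.band a 16777215 ∧ PySem.Int.band a 16777215 ≤ 16777215 := by
  unfold PySem.Int.band
  split_ifs with h1 h2 h2
  · have := Nat.and_le_right (n := a.toNat) (m := (16777215 : Int).toNat)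
    constructor
    · exact Int.natCast_nonneg _
    · norm_num at this ⊢
      try omega
  · omega
  · have h3 := Nat.sub_le (16777215 : Int).toNat ((16777215 : Int).toNat &&& (-a - 1).toNat)
    constructor
    · exact Int.natCast_nonneg _
    · norm_num at h3 ⊢
      try omega
  · omega

lemma pvStep_bounds (x : Int) : 0 ≤ pvStep x ∧ pvStep x < 16777216 := by
  simp only [pvStep]
  exact ⟨(band_mask_bounds _).1, lt_of_le_of_lt (band_mask_bounds _).2 (by norm_num)⟩

-- a foldl that ignores the list elements is an iterate
lemma foldl_const_iterate {α β : Type} (g : β → β) : ∀ (l : List α) (x : β),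
    l.foldl (fun s _ => g s) x = g^[l.length] x := by
  intro l
  induction l with
  | nil => intro x; rfl
  | cons c cs ih =>
      intro x
      simp [ih, Function.iterate_succ_apply]

lemma pyRange_len (it : Int) : (PySem.List.pyRange 0 it 1).length = it.toNat := by
  by_cases h : 0 ≤ it
  · obtain ⟨n, rfl⟩ := Int.eq_ofNat_of_zero_le h
    rw [PySem.List.pyRange_zero_natCast n]
    simp
  · have h0 : ¬ ((0 : Int) < it) := by omega
    simp [PySem.List.pyRange, h0]
    omega

-- iterating the Int step is iterating the Nat step
lemma pvStep_iterate (j : Nat) : ∀ (w : Nat), pvStep^[j] ((w : Nat) : Int) = ((stepN^[j] w : Nat) : Int) := by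
  induction j with
  | zero => intro w; rfl
  | succ j ih =>
      intro w
      rw [Function.iterate_succ_apply, Function.iterate_succ_apply, pvStep_natCast, ih]

-- A is the iterate of the step
lemma genA_iterate (number : Int) (it : Int) :
    generate_secret_number number it = pvStep^[it.toNat] number := by
  have h : generate_secret_number number it
      = (PySem.List.pyRange 0 it 1).foldl (fun s _ => pvStep s) number := rfl
  rw [h, foldl_const_iterate, pyRange_len]

-- the iterate of applying the step matrix is the iterate of the step, below 2^24
lemma applyN_matrix_iterate : ∀ (j : Nat) (w : Nat), w < 16777216 →
    (applyN (pvStepMatrix.map Int.toNat))^[j] w = stepN^[j] w := by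
  have hcols : pvStepMatrix.map Int.toNat = (List.range 24).map (fun j => stepN (1 <<< j)) := by
    unfold pvStepMatrix
    rw [List.map_map]
    apply List.map_congr_left
    intro j _
    have h1 : ((1 : Int) <<< j) = (((1 <<< j : Nat) : Nat) : Int) := by
      rw [Int.natCast_shiftLeft]
      norm_num
    show (pvStep ((1 : Int) <<< j)).toNat = stepN (1 <<< j)
    rw [h1, pvStep_natCast, Int.toNat_natCast]
  have happly : ∀ w : Nat, w < 16777216 → applyN (pvStepMatrix.map Int.toNat) w = stepN w := by
    intro w hw
    rw [hcols]
    have h24 : (16777216 : Nat) = 2 ^ 24 := by norm_num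
    exact applyN_of_linear 24 stepN stepN_linear (by decide) w (lt_of_lt_of_le hw (le_of_eq h24))
  intro j
  induction j with
  | zero => intro w _; rfl
  | succ j ih =>
      intro w hw
      rw [Function.iterate_succ_apply, Function.iterate_succ_apply, happly w hw,
        ih (stepN w) (stepN_lt w)]

theorem pre_spec (number : Int) (iterations : Int) :
    generate_secret_number number iterations = generate_secret_number_alt number iterations := by
  by_cases h : iterations ≤ 0
  · unfold generate_secret_number_alt
    rw [if_pos h, genA_iterate]
    have h0 : iterations.toNat = 0 := by omega
    rw [h0]
    rfl
  · unfold generate_secret_number_alt pvMatpow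
    rw [if_neg h]
    push_neg at h
    -- nonnegativity of the matrices
    have hM : ∀ c ∈ pvStepMatrix, 0 ≤ c := by
      intro c hc
      unfold pvStepMatrix at hc
      obtain ⟨j, _, rfl⟩ := List.mem_map.mp hc
      exact (pvStep_bounds _).1
    have hId : ∀ c ∈ (List.range 24).map (fun j : Nat => (1 : Int) <<< j), 0 ≤ c := by
      intro c hc
      obtain ⟨j, _, rfl⟩ := List.mem_map.mp hc
      have h1 : ((1 : Int) <<< j) = (((1 <<< j : Nat) : Nat) : Int) := by
        rw [Int.natCast_shiftLeft]; norm_num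
      rw [h1]
      exact Int.natCast_nonneg _
    -- the step output as a Nat
    have hv := pvStep_bounds number
    set v0 : Nat := (pvStep number).toNat with hv0
    have hvc : pvStep number = ((v0 : Nat) : Int) := by omega
    have hvlt : v0 < 16777216 := by omega
    rw [hvc, pvMatpowLoop_apply _ pvStepMatrix _ hM hId v0]
    -- the identity matrix really is the identity
    have hidN : ((List.range 24).map (fun j : Nat => (1 : Int) <<< j)).map Int.toNat
        = (List.range 24).map (fun j => (fun x => x) (1 <<< j)) := by
      rw [List.map_map]
      apply List.map_congr_left
      intro j _
      have h1 : ((1 : Int) <<< j) = (((1 <<< j : Nat) : Nat) : Int) := by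
        rw [Int.natCast_shiftLeft]; norm_num
      show ((1 : Int) <<< j).toNat = (fun x => x) (1 <<< j)
      rw [h1, Int.toNat_natCast]
    have hid : applyN (((List.range 24).map (fun j : Nat => (1 : Int) <<< j)).map Int.toNat) v0 = v0 := by
      rw [hidN]
      have h24 : (16777216 : Nat) = 2 ^ 24 := by norm_num
      exact applyN_of_linear 24 (fun x => x) (fun _ _ => rfl) rfl v0 (lt_of_lt_of_le hvlt (le_of_eq h24))
    rw [hid, applyN_matrix_iterate _ v0 hvlt, genA_iterate]
    have hn : iterations.toNat = ((iterations - 1).toNat) + 1 := by omega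
    rw [hn, Function.iterate_succ_apply, hvc, pvStep_iterate]

-- ===== VERDICT (by name: the statement is the Claim_ definition above) =====
theorem generate_secret_number_spec : Claim_equal_generate_secret_number := by
  intro number iterations _
  unfold Spec_generate_secret_number
  exact pre_spec number iterations
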